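-- pv_equiv track=rewrite | github.com/GlenboLake/DailyProgrammer | C220E_mangling_sentences.py | mangle_word
-- ===== SOURCE A (Python) =====
-- import string
--
-- def mangle_word(word):
--     new_word = sorted([letter for letter in word.lower() if letter in string.ascii_lowercase])
--     for i, ch in enumerate(word):
--         if ch in string.ascii_uppercase:
--             new_word[i] = new_word[i].upper()
--         elif ch not in string.ascii_letters:
--             new_word.insert(i, ch)
--     return ''.join(new_word)
-- ===== SOURCE B (Python) =====
-- import string
--
-- def mangle_word(word):
--     letters = iter(sorted(c for c in word.lower() if c in string.ascii_lowercase))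
--     out = []
--     for ch in word:
--         if ch in string.ascii_uppercase:
--             out.append(next(letters).upper())
--         elif ch in string.ascii_lowercase:
--             out.append(next(letters))
--         else:
--             out.append(ch)
--     return ''.join(out)
-- ===== Notes on version B (the rewrite author's own statement) =====
-- stated objective: simpler
-- what changed: Replaces A's in-place index mutation of the sorted letter list (set-at-i / insert-at-i) with a single forward pass that builds a fresh output, consuming the sorted letters as a queue and keeping non-letters in place.
import Mathlib
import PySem

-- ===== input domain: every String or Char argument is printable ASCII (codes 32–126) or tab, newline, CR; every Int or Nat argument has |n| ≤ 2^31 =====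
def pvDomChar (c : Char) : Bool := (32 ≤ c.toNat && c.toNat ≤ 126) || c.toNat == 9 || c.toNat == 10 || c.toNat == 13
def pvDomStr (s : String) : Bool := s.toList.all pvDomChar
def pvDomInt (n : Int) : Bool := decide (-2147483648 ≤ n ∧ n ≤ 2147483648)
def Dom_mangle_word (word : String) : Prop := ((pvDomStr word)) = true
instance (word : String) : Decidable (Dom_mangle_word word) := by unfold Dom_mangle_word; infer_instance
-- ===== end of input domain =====

-- B replaces A's in-place index surgery on the sorted letter list (set-at-i / insert-at-i)
-- with a single forward pass that builds a fresh output, consuming the sorted letters as a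
-- queue and copying non-letters through (objective: simpler).

-- ===== PORT A =====
-- string.ascii_lowercase / string.ascii_uppercase / string.ascii_letters as lists of chars
def asciiLowercase : List Char :=
  ['a','b','c','d','e','f','g','h','i','j','k','l','m','n','o','p','q','r','s','t','u','v','w','x','y','z']
def asciiUppercase : List Char :=
  ['A','B','C','D','E','F','G','H','I','J','K','L','M','N','O','P','Q','R','S','T','U','V','W','X','Y','Z']
def asciiLetters : List Char := asciiLowercase ++ asciiUppercase

-- A's `for i, ch in enumerate(word)` loop, mutating new_word.
-- new_word[i] is always in range when the branch is taken (Python would raise otherwise);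
-- the .getD fallback is never reached.
def mangleLoopA : List Char → Nat → List Char → List Char
  | new_word, _, [] => new_word
  | new_word, i, ch :: rest =>
    if asciiUppercase.contains ch then
      let c := (PySem.List.pyGet? new_word (i : Int)).getD ch
      mangleLoopA (new_word.set i (PySem.Chars.upperChar c)) (i + 1) rest
    else if asciiLetters.contains ch = false then
      mangleLoopA (PySem.List.insert new_word (i : Int) ch) (i + 1) rest
    else
      mangleLoopA new_word (i + 1) rest

def mangle_word (word : String) : String :=
  let new_word := PySem.List.sorted
    ((PySem.Chars.lower word.toList).filter (fun letter => asciiLowercase.contains letter))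
    (fun c => c) false
  String.ofList (mangleLoopA new_word 0 word.toList)

-- ===== PORT B =====
-- B's forward pass: consume the sorted letters as a queue; the [] cases mirror a
-- next() on an exhausted iterator, which never happens (one sorted letter per letter of word).
def mangleLoopB : List Char → List Char → List Char
  | _, [] => []
  | letters, ch :: rest =>
    if asciiUppercase.contains ch then
      match letters with
      | l :: ls => PySem.Chars.upperChar l :: mangleLoopB ls rest
      | [] => []
    else if asciiLowercase.contains ch then
      match letters with
      | l :: ls => l :: mangleLoopB ls rest
      | [] => []
    else
      ch :: mangleLoopB letters rest

def mangle_word_alt (word : String) : String :=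
  let letters := PySem.List.sorted
    ((PySem.Chars.lower word.toList).filter (fun c => asciiLowercase.contains c))
    (fun c => c) false
  String.ofList (mangleLoopB letters word.toList)

-- ===== PRECONDITION & SPEC =====
def Spec_mangle_word (word : String) (out : String) : Prop := out = mangle_word_alt word
instance (word : String) (out : String) : Decidable (Spec_mangle_word word out) := by unfold Spec_mangle_word; infer_instance

-- ===== CLAIM (what is proved, stated in full; the proofs are below) =====
def Claim_equal_mangle_word : Prop := ∀ (word : String), Dom_mangle_word word → Spec_mangle_word word (mangle_word word)

-- ===== LEMMAS AND PROOFS =====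
theorem charToNat_ofNat (n : Nat) (h : n < 55296) : (Char.ofNat n).toNat = n := by
  unfold Char.ofNat
  rw [dif_pos (by omega : n.isValidChar)]
  simp [Char.ofNatAux, Char.toNat]

theorem mem_lc_iff (c : Char) : (c ∈ asciiLowercase) ↔ (97 ≤ c.toNat ∧ c.toNat ≤ 122) := by
  constructor
  · intro hm; fin_cases hm <;> exact ⟨by decide, by decide⟩
  · rintro ⟨h1, h2⟩
    rw [← Char.ofNat_toNat c]
    interval_cases h : c.toNat <;> decide

theorem mem_uc_iff (c : Char) : (c ∈ asciiUppercase) ↔ (65 ≤ c.toNat ∧ c.toNat ≤ 90) := by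
  constructor
  · intro hm; fin_cases hm <;> exact ⟨by decide, by decide⟩
  · rintro ⟨h1, h2⟩
    rw [← Char.ofNat_toNat c]
    interval_cases h : c.toNat <;> decide

theorem contains_lc (c : Char) : asciiLowercase.contains c = PySem.Chars.islower c := by
  rw [Bool.eq_iff_iff]
  simp only [List.contains_eq_mem, decide_eq_true_eq, mem_lc_iff,
    PySem.Chars.islower, Bool.and_eq_true, decide_eq_true_eq]
  exact Iff.rfl

theorem contains_uc (c : Char) : asciiUppercase.contains c = PySem.Chars.isupper c := by
  rw [Bool.eq_iff_iff]
  simp only [List.contains_eq_mem, decide_eq_true_eq, mem_uc_iff,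
    PySem.Chars.isupper, Bool.and_eq_true, decide_eq_true_eq]
  exact Iff.rfl

-- lowering a char makes it ascii-lowercase exactly if it was an ascii letter
theorem lowerChar_lc (c : Char) :
    asciiLowercase.contains (PySem.Chars.lowerChar c)
      = (asciiLowercase.contains c || asciiUppercase.contains c) := by
  rw [contains_lc, contains_lc, contains_uc]
  unfold PySem.Chars.lowerChar
  by_cases hu : PySem.Chars.isupper c = true
  · rw [if_pos hu, hu]
    simp only [PySem.Chars.isupper, Bool.and_eq_true, decide_eq_true_eq] at hu
    have h1 : 65 ≤ c.toNat := hu.1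
    have h2 : c.toNat ≤ 90 := hu.2
    have ht := charToNat_ofNat (c.toNat + 32) (by omega)
    simp only [PySem.Chars.islower, Bool.or_true, Bool.and_eq_true, decide_eq_true_eq]
    exact ⟨show 97 ≤ (Char.ofNat (c.toNat + 32)).toNat by omega,
           show (Char.ofNat (c.toNat + 32)).toNat ≤ 122 by omega⟩
  · have hf : PySem.Chars.isupper c = false := by simpa using hu
    rw [if_neg hu, hf]
    simp

-- proof-only: how many ascii letters a char list holds
def letterCount (xs : List Char) : Nat :=
  (xs.filter (fun c => asciiLowercase.contains c || asciiUppercase.contains c)).length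

theorem filter_lower_length (xs : List Char) :
    ((PySem.Chars.lower xs).filter (fun c => asciiLowercase.contains c)).length
      = letterCount xs := by
  induction xs with
  | nil => rfl
  | cons c rest ih =>
    unfold letterCount PySem.Chars.lower at *
    rw [List.map_cons, List.filter_cons, List.filter_cons, lowerChar_lc c]
    cases hb : (asciiLowercase.contains c || asciiUppercase.contains c) <;> simpa using ih

theorem mangleLoopB_nonletter (letters : List Char) (ch : Char) (rest : List Char)
    (hu : asciiUppercase.contains ch = false) (hl : asciiLowercase.contains ch = false) :
    mangleLoopB letters (ch :: rest) = ch :: mangleLoopB letters rest := by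
  cases letters <;>
    rw [mangleLoopB, if_neg (by rw [hu]; simp), if_neg (by rw [hl]; simp)]

theorem loop_eq : ∀ (rest letters done : List Char),
    letters.length = letterCount rest →
    mangleLoopA (done ++ letters) done.length rest = done ++ mangleLoopB letters rest := by
  intro rest
  induction rest with
  | nil =>
    intro letters done h
    have : letters = [] := List.eq_nil_of_length_eq_zero (by simpa [letterCount] using h)
    subst this
    simp [mangleLoopA, mangleLoopB]
  | cons ch rest ih =>
    intro letters done h
    by_cases hu : asciiUppercase.contains ch = true
    · -- uppercase: A sets position i, B consumes a letter and uppercases it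
      have hcnt : letterCount (ch :: rest) = letterCount rest + 1 := by
        unfold letterCount
        rw [List.filter_cons,
          show (asciiLowercase.contains ch || asciiUppercase.contains ch) = true from by
            rw [hu]; simp]
        simp
      obtain ⟨l, ls, rfl⟩ : ∃ l ls, letters = l :: ls := by
        cases letters with
        | nil => rw [hcnt] at h; simp at h
        | cons l ls => exact ⟨l, ls, rfl⟩
      rw [show mangleLoopA (done ++ l :: ls) done.length (ch :: rest)
            = mangleLoopA ((done ++ l :: ls).set done.length
                (PySem.Chars.upperChar ((PySem.List.pyGet? (done ++ l :: ls) (done.length : Int)).getD ch)))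
                (done.length + 1) rest from by rw [mangleLoopA]; rw [if_pos hu]]
      have hget : PySem.List.pyGet? (done ++ l :: ls) ((done.length : Nat) : Int) = some l := by
        rw [PySem.List.pyGet?_natCast]
        simp
      rw [hget]
      simp only [Option.getD_some]
      have hset : (done ++ l :: ls).set done.length (PySem.Chars.upperChar l)
          = (done ++ [PySem.Chars.upperChar l]) ++ ls := by
        rw [List.set_append]
        simp
      rw [hset]
      have hlen : ls.length = letterCount rest := by rw [hcnt] at h; simpa using h
      have := ih ls (done ++ [PySem.Chars.upperChar l]) hlen
      simp only [List.length_append, List.length_cons, List.length_nil] at this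
      rw [show done.length + 1 = done.length + (0 + 1) from by omega]
      rw [this]
      rw [mangleLoopB, if_pos hu]
      simp
    · have hu' : asciiUppercase.contains ch = false := by simpa using hu
      by_cases hl : asciiLowercase.contains ch = true
      · -- lowercase: A skips (letter stays where sorted), B consumes it
        have hcnt : letterCount (ch :: rest) = letterCount rest + 1 := by
          unfold letterCount
          rw [List.filter_cons,
            show (asciiLowercase.contains ch || asciiUppercase.contains ch) = true from by
              rw [hl]; simp]
          simp
        obtain ⟨l, ls, rfl⟩ : ∃ l ls, letters = l :: ls := by
          cases letters with
          | nil => rw [hcnt] at h; simp at h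
          | cons l ls => exact ⟨l, ls, rfl⟩
        have hmem : asciiLetters.contains ch = true := by
          rw [asciiLetters, List.contains_append, hl, Bool.true_or]
        rw [show mangleLoopA (done ++ l :: ls) done.length (ch :: rest)
              = mangleLoopA (done ++ l :: ls) (done.length + 1) rest from by
            rw [mangleLoopA, if_neg (by rw [hu']; simp), if_neg (by rw [hmem]; simp)]]
        have hlen : ls.length = letterCount rest := by rw [hcnt] at h; simpa using h
        have := ih ls (done ++ [l]) hlen
        simp only [List.length_append, List.length_cons, List.length_nil] at this
        rw [show done.length + 1 = done.length + (0 + 1) from by omega]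
        rw [show done ++ l :: ls = (done ++ [l]) ++ ls from by simp]
        rw [this]
        rw [mangleLoopB, if_neg (by rw [hu']; simp), if_pos hl]
        simp
      · -- non-letter: A inserts ch at i, B copies ch through
        have hl' : asciiLowercase.contains ch = false := by simpa using hl
        have hcnt : letterCount (ch :: rest) = letterCount rest := by
          unfold letterCount
          rw [List.filter_cons,
            show (asciiLowercase.contains ch || asciiUppercase.contains ch) = false from by
              rw [hl', hu']; rfl]
          simp
        have hmem : asciiLetters.contains ch = false := by
          rw [asciiLetters, List.contains_append, hl', hu']; rfl
        have hins : PySem.List.insert (done ++ letters) ((done.length : Nat) : Int) ch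
            = (done ++ [ch]) ++ letters := by
          rw [PySem.List.insert_natCast _ done.length ch (by simp)]
          simp
        rw [show mangleLoopA (done ++ letters) done.length (ch :: rest)
              = mangleLoopA (PySem.List.insert (done ++ letters) (done.length : Int) ch)
                  (done.length + 1) rest from by
            rw [mangleLoopA, if_neg (by rw [hu']; simp), if_pos hmem]]
        rw [hins]
        have hlen : letters.length = letterCount rest := by rw [hcnt] at h; exact h
        have := ih letters (done ++ [ch]) hlen
        simp only [List.length_append, List.length_cons, List.length_nil] at this
        rw [show done.length + 1 = done.length + (0 + 1) from by omega]
        rw [this]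
        rw [mangleLoopB_nonletter letters ch rest hu' hl']
        simp

-- ===== VERDICT (by name: the statement is the Claim_ definition above) =====
theorem mangle_word_spec : Claim_equal_mangle_word := by
  intro word _
  unfold Spec_mangle_word mangle_word mangle_word_alt
  have h : (PySem.List.sorted
      ((PySem.Chars.lower word.toList).filter (fun c => asciiLowercase.contains c))
      (fun c => c) false).length = letterCount word.toList := by
    rw [PySem.List.length_sorted]
    exact filter_lower_length word.toList
  exact congrArg String.ofList (by
    simpa using loop_eq word.toList
      (PySem.List.sorted
        ((PySem.Chars.lower word.toList).filter (fun c => asciiLowercase.contains c))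
        (fun c => c) false) [] h)
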